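-- pv_equiv track=rewrite | github.com/oppm/coursera | AlgorithmicToolbox/week6_dynamic_programming2/2_partitioning_souvenirs/partition3.py | partition3_brute_force
-- ===== SOURCE A (Python) =====
-- import itertools
--
-- def partition3_brute_force(A):
--     s = sum(A[k] for k in range(len(A)))
--     if s % 3 > 0:
--         return 0
--
--     partial_sum = s // 3
--
--     for c in itertools.product(range(3), repeat=len(A)):
--         sums = [None] * 3
--         sums[0] = sum(A[k] for k in range(len(A)) if c[k] == 0)
--         if sums[0] == partial_sum:
--             sums[1] = sum(A[k] for k in range(len(A)) if c[k] == 1)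
--             if sums[1] == partial_sum:
--                 sums[2] = sum(A[k] for k in range(len(A)) if c[k] == 2)
--                 if sums[2] == partial_sum:
--                     return 1
--     return 0
-- ===== SOURCE B (Python) =====
-- def partition3_brute_force(A):
--     s = sum(A)
--     if s % 3:
--         return 0
--     t = s // 3
--     reach = {(0, 0)}
--     for a in A:
--         reach = {q for (x, y) in reach
--                    for q in ((x + a, y), (x, y + a), (x, y))}
--     return 1 if (t, t) in reach else 0
-- ===== Notes on version B (the rewrite author's own statement) =====
-- stated objective: alternative
-- what changed: Replaced the 3^n enumeration of all label assignments by a dynamic program over the set of reachable (sum-of-part-1, sum-of-part-2) pairs, one pass over the list.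
import Mathlib
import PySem

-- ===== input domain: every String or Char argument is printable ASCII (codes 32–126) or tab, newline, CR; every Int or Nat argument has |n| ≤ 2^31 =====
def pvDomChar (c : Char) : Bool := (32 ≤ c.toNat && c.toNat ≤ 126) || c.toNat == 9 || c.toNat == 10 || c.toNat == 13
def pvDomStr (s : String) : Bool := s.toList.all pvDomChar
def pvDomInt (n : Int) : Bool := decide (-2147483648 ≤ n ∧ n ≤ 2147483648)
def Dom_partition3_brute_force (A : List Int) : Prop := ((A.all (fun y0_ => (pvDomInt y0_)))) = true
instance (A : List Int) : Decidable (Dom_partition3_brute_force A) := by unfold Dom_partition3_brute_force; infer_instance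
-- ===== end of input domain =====

-- B replaces A's 3^n enumeration of label assignments by a one-pass DP over the
-- set of reachable (sum-of-part-1, sum-of-part-2) pairs; same return value.


-- ===== PORT A =====

-- itertools.product(range(3), repeat=n), in itertools order
def pvProd3 : Nat → List (List Int)
  | 0 => [[]]
  | n + 1 => ([0, 1, 2] : List Int).flatMap (fun x => (pvProd3 n).map (fun c => x :: c))

-- sum(A[k] for k in range(len(A)) if c[k] == v)
def pvSumSel (A c : List Int) (v : Int) : Int :=
  (PySem.List.pyRange 0 (A.length : Int) 1).foldl
    (fun acc k => if PySem.List.pyGetD c k 0 = v then acc + PySem.List.pyGetD A k 0 else acc) 0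

-- the 'for c in itertools.product(...)' loop with its early 'return 1'
def pvLoopA (A : List Int) (t : Int) : List (List Int) → Int
  | [] => 0
  | c :: rest =>
    if pvSumSel A c 0 = t then
      if pvSumSel A c 1 = t then
        if pvSumSel A c 2 = t then 1
        else pvLoopA A t rest
      else pvLoopA A t rest
    else pvLoopA A t rest

def partition3_brute_force (A : List Int) : Int :=
  let s := (PySem.List.pyRange 0 (A.length : Int) 1).foldl
    (fun acc k => acc + PySem.List.pyGetD A k 0) 0
  if PySem.Int.mod s 3 > 0 then 0
  else pvLoopA A (PySem.Int.floordiv s 3) (pvProd3 A.length)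

-- ===== PORT B =====

-- one step of the DP: {q for (x,y) in reach for q in ((x+a,y),(x,y+a),(x,y))}
def pvAltStep (a : Int) (r : PySem.Set (Int × Int)) : PySem.Set (Int × Int) :=
  PySem.Set.ofList (r.flatMap (fun p => [(p.1 + a, p.2), (p.1, p.2 + a), (p.1, p.2)]))

def partition3_brute_force_alt (A : List Int) : Int :=
  let s := A.sum
  if PySem.Int.mod s 3 > 0 then 0
  else
    let t := PySem.Int.floordiv s 3
    let reach := A.foldl (fun r a => pvAltStep a r) (PySem.Set.ofList [((0 : Int), (0 : Int))])
    if (t, t) ∈ reach then 1 else 0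

-- ===== PRECONDITION & SPEC =====
def Spec_partition3_brute_force (A : List Int) (out : Int) : Prop := out = partition3_brute_force_alt A
instance (A : List Int) (out : Int) : Decidable (Spec_partition3_brute_force A out) := by unfold Spec_partition3_brute_force; infer_instance

-- ===== CLAIM (what is proved, stated in full; the proofs are below) =====
def Claim_equal_partition3_brute_force : Prop := ∀ (A : List Int), Dom_partition3_brute_force A → Spec_partition3_brute_force A (partition3_brute_force A)

-- ===== LEMMAS AND PROOFS =====

-- selective sum over the zipped lists, in recursive form
def pvZSum (v : Int) : List (Int × Int) → Int
  | [] => 0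
  | p :: ps => (if p.2 = v then p.1 else 0) + pvZSum v ps

lemma pvZSum_foldl (v : Int) (l : List (Int × Int)) (init : Int) :
    l.foldl (fun acc p => if p.2 = v then acc + p.1 else acc) init = init + pvZSum v l := by
  induction l generalizing init with
  | nil => simp [pvZSum]
  | cons p ps ih =>
    simp only [List.foldl_cons, pvZSum, ih]
    split_ifs <;> ring

-- the index fold over two lists equals the fold over their zip
lemma pvFoldl_range_zip (f : Int → Int → Int → Int) :
    ∀ (A c : List Int) (init : Int), c.length = A.length →
      (List.range A.length).foldl (fun acc k => f acc (A.getD k 0) (c.getD k 0)) init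
        = (A.zip c).foldl (fun acc p => f acc p.1 p.2) init := by
  intro A
  induction A with
  | nil => intro c init h; simp
  | cons a as ih =>
    intro c init h
    cases c with
    | nil => simp at h
    | cons x xs =>
      simp only [List.length_cons] at h
      have h' : xs.length = as.length := by omega
      simp only [List.length_cons, List.range_succ_eq_map, List.foldl_cons, List.foldl_map,
        List.getD_cons_succ, List.getD_cons_zero, List.zip_cons_cons]
      exact ih xs (f init a x) h'

lemma pvSumSel_eq (A c : List Int) (v : Int) (h : c.length = A.length) :
    pvSumSel A c v = pvZSum v (A.zip c) := by
  unfold pvSumSel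
  rw [PySem.List.pyRange_one]
  simp only [sub_zero, Int.toNat_natCast, List.foldl_map, zero_add,
    PySem.List.pyGetD_natCast]
  rw [pvFoldl_range_zip (fun acc a x => if x = v then acc + a else acc) A c 0 h]
  rw [pvZSum_foldl]
  ring

-- A's initial sum is the list sum
lemma pvSumA (A : List Int) :
    (PySem.List.pyRange 0 (A.length : Int) 1).foldl (fun acc k => acc + PySem.List.pyGetD A k 0) 0
      = A.sum := by
  rw [PySem.List.foldl_pyRange_zero_pyGetD' A 0 (fun acc a => acc + a) 0]
  induction A using List.reverseRecOn with
  | nil => simp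
  | append_singleton as a ih => simp [List.foldl_append, ih]

-- membership in itertools.product(range(3), repeat=n)
lemma pvMem_prod3 (c : List Int) : ∀ n, c ∈ pvProd3 n ↔
    c.length = n ∧ ∀ x ∈ c, x = 0 ∨ x = 1 ∨ x = 2 := by
  induction c with
  | nil =>
    intro n; cases n with
    | zero => simp [pvProd3]
    | succ m => simp [pvProd3]
  | cons x xs ih =>
    intro n; cases n with
    | zero => simp [pvProd3]
    | succ m =>
      simp only [pvProd3, List.mem_flatMap, List.mem_map]
      constructor
      · rintro ⟨y, hy, c', hc', heq⟩
        obtain ⟨rfl, rfl⟩ : y = x ∧ c' = xs := by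
          cases heq; exact ⟨rfl, rfl⟩
        obtain ⟨hl, hall⟩ := (ih m).mp hc'
        refine ⟨by simp [hl], ?_⟩
        intro z hz
        rcases List.mem_cons.mp hz with rfl | hz'
        · simpa using hy
        · exact hall z hz'
      · rintro ⟨hl, hall⟩
        refine ⟨x, ?_, xs, (ih m).mpr ⟨by simpa using hl, fun z hz => hall z (List.mem_cons_of_mem _ hz)⟩, rfl⟩
        rcases hall x (List.mem_cons_self) with h | h | h <;> simp [h]

-- the three selective sums add up to the total sum
lemma pvZSum_total (L c : List Int) (h : c.length = L.length)
    (hall : ∀ x ∈ c, x = 0 ∨ x = 1 ∨ x = 2) :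
    pvZSum 0 (L.zip c) + pvZSum 1 (L.zip c) + pvZSum 2 (L.zip c) = L.sum := by
  induction L generalizing c with
  | nil => simp [pvZSum]
  | cons a as ih =>
    cases c with
    | nil => simp at h
    | cons x xs =>
      simp only [List.length_cons] at h
      have h' : xs.length = as.length := by omega
      have hxs : ∀ y ∈ xs, y = 0 ∨ y = 1 ∨ y = 2 :=
        fun y hy => hall y (List.mem_cons_of_mem _ hy)
      have hx := hall x List.mem_cons_self
      simp only [List.zip_cons_cons, pvZSum, List.sum_cons]
      have := ih xs h' hxs
      rcases hx with rfl | rfl | rfl <;> simp <;> linarith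

-- membership in B's reach set after folding L, from an arbitrary start set
lemma pvMem_reach (L : List Int) :
    ∀ (r : PySem.Set (Int × Int)) (p : Int × Int),
      p ∈ L.foldl (fun r a => pvAltStep a r) r ↔
        ∃ q ∈ r, ∃ c : List Int, c.length = L.length ∧ (∀ x ∈ c, x = 0 ∨ x = 1 ∨ x = 2) ∧
          p = (q.1 + pvZSum 0 (L.zip c), q.2 + pvZSum 1 (L.zip c)) := by
  induction L with
  | nil =>
    intro r p
    simp only [List.foldl_nil]
    constructor
    · intro hp; exact ⟨p, hp, [], rfl, by simp, by simp [pvZSum]⟩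
    · rintro ⟨q, hq, c, hlen, -, hp⟩
      have hc : c = [] := List.eq_nil_of_length_eq_zero (by simpa using hlen)
      subst hc
      subst hp
      simpa [pvZSum] using hq
  | cons a as ih =>
    intro r p
    simp only [List.foldl_cons]
    rw [ih]
    have hstep : ∀ q' : Int × Int, q' ∈ pvAltStep a r ↔
        ∃ q ∈ r, q' = (q.1 + a, q.2) ∨ q' = (q.1, q.2 + a) ∨ q' = (q.1, q.2) := by
      intro q'
      unfold pvAltStep
      rw [PySem.Set.mem_ofList]
      simp only [List.mem_flatMap, List.mem_cons, List.not_mem_nil, or_false]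
    constructor
    · rintro ⟨q', hq', c, hlen, hall, rfl⟩
      obtain ⟨q, hq, hcase⟩ := (hstep q').mp hq'
      rcases hcase with rfl | rfl | rfl
      · exact ⟨q, hq, 0 :: c, by simp [hlen], by
          intro x hx; rcases List.mem_cons.mp hx with rfl | hx'
          · left; rfl
          · exact hall x hx', by simp [pvZSum]; ring_nf⟩
      · exact ⟨q, hq, 1 :: c, by simp [hlen], by
          intro x hx; rcases List.mem_cons.mp hx with rfl | hx'
          · right; left; rfl
          · exact hall x hx', by simp [pvZSum]; ring_nf⟩
      · exact ⟨q, hq, 2 :: c, by simp [hlen], by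
          intro x hx; rcases List.mem_cons.mp hx with rfl | hx'
          · right; right; rfl
          · exact hall x hx', by simp [pvZSum]⟩
    · rintro ⟨q, hq, c, hlen, hall, rfl⟩
      cases c with
      | nil => simp at hlen
      | cons x xs =>
        simp only [List.length_cons] at hlen
        have hxs : ∀ y ∈ xs, y = 0 ∨ y = 1 ∨ y = 2 :=
          fun y hy => hall y (List.mem_cons_of_mem _ hy)
        rcases hall x List.mem_cons_self with rfl | rfl | rfl
        · exact ⟨(q.1 + a, q.2), (hstep _).mpr ⟨q, hq, Or.inl rfl⟩, xs, by omega, hxs, by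
            simp [pvZSum]; ring_nf⟩
        · exact ⟨(q.1, q.2 + a), (hstep _).mpr ⟨q, hq, Or.inr (Or.inl rfl)⟩, xs, by omega, hxs, by
            simp [pvZSum]; ring_nf⟩
        · exact ⟨(q.1, q.2), (hstep _).mpr ⟨q, hq, Or.inr (Or.inr rfl)⟩, xs, by omega, hxs, by
            simp [pvZSum]⟩

-- A's loop returns 1 iff some assignment in the list has all three sums equal to t
lemma pvLoopA_eq_one (A : List Int) (t : Int) :
    ∀ l : List (List Int), pvLoopA A t l =
      (if ∃ c ∈ l, pvSumSel A c 0 = t ∧ pvSumSel A c 1 = t ∧ pvSumSel A c 2 = t then 1 else 0) := by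
  intro l
  induction l with
  | nil => simp [pvLoopA]
  | cons c rest ih =>
    simp only [pvLoopA, ih, List.mem_cons]
    by_cases h0 : pvSumSel A c 0 = t <;> by_cases h1 : pvSumSel A c 1 = t <;>
      by_cases h2 : pvSumSel A c 2 = t <;>
      simp [h0, h1, h2]

-- ===== VERDICT (by name: the statement is the Claim_ definition above) =====
theorem partition3_brute_force_spec : Claim_equal_partition3_brute_force := by
  intro A _
  unfold Spec_partition3_brute_force partition3_brute_force partition3_brute_force_alt
  rw [pvSumA]
  by_cases hmod : PySem.Int.mod A.sum 3 > 0
  · rw [if_pos hmod, if_pos hmod]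
  · rw [if_neg hmod, if_neg hmod]
    have h3 : (3 : Int) ∣ A.sum := by
      rw [← PySem.Int.mod_eq_zero_iff_dvd]
      have := PySem.Int.mod_nonneg A.sum (b := 3) (by norm_num)
      omega
    set t := PySem.Int.floordiv A.sum 3 with ht
    have hst : A.sum = 3 * t := by
      obtain ⟨k, hk⟩ := h3
      rw [ht, PySem.Int.floordiv_eq_ediv_of_pos (by norm_num), hk,
        Int.mul_ediv_cancel_left _ (by norm_num)]
    rw [pvLoopA_eq_one]
    have hiff : (∃ c ∈ pvProd3 A.length,
        pvSumSel A c 0 = t ∧ pvSumSel A c 1 = t ∧ pvSumSel A c 2 = t) ↔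
        ((t, t) ∈ A.foldl (fun r a => pvAltStep a r) (PySem.Set.ofList [((0 : Int), (0 : Int))])) := by
      rw [pvMem_reach]
      constructor
      · rintro ⟨c, hc, h0, h1, -⟩
        obtain ⟨hlen, hall⟩ := (pvMem_prod3 c A.length).mp hc
        refine ⟨(0, 0), by simp [PySem.Set.mem_ofList], c, hlen, hall, ?_⟩
        rw [pvSumSel_eq A c 0 hlen] at h0
        rw [pvSumSel_eq A c 1 hlen] at h1
        simp [h0, h1]
      · rintro ⟨q, hq, c, hlen, hall, heq⟩
        have hq00 : q = (0, 0) := by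
          simpa [PySem.Set.mem_ofList] using hq
        subst hq00
        have h0 : pvZSum 0 (A.zip c) = t := by
          have := congrArg Prod.fst heq; simpa using this.symm
        have h1 : pvZSum 1 (A.zip c) = t := by
          have := congrArg Prod.snd heq; simpa using this.symm
        have h2 : pvZSum 2 (A.zip c) = t := by
          have htot := pvZSum_total A c hlen hall
          rw [h0, h1, hst] at htot; linarith
        exact ⟨c, (pvMem_prod3 c A.length).mpr ⟨hlen, hall⟩,
          by rw [pvSumSel_eq A c 0 hlen]; exact h0,
          by rw [pvSumSel_eq A c 1 hlen]; exact h1,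
          by rw [pvSumSel_eq A c 2 hlen]; exact h2⟩
    by_cases hmem : (t, t) ∈ A.foldl (fun r a => pvAltStep a r) (PySem.Set.ofList [((0 : Int), (0 : Int))])
    · rw [if_pos hmem, if_pos (hiff.mpr hmem)]
    · rw [if_neg hmem, if_neg (fun h => hmem (hiff.mp h))]
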